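-- pv_equiv track=rewrite | github.com/rickyurvinaunab/INTRO_11285 | clases/ordenamiento/p10_compilado_ordenamiento.py | ordenar_ocupacion
-- ===== SOURCE A (Python) =====
-- def criterio(item):
--     return (-item[1], item[0])
--
-- def ordenar_ocupacion(aud):
--     lista = []
--     indice = 0
--     for indice_c in range(len(aud[0])):
--         contador_x = 0
--         for indice_f in range(len(aud)):
--             if aud[indice_f][indice_c] == "X":
--                 contador_x += 1
--         lista.append([indice, contador_x])
--         indice+=1
--     lista.sort(key=criterio)
--     return lista
-- ===== SOURCE B (Python) =====
-- def ordenar_ocupacion(aud):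
--     # Row-major tally into a dict, then emit in counting-sort order
--     # (counts descending, column index ascending) -- no comparison sort.
--     ancho = len(aud[0])
--     filas = len(aud)
--     cont = {}
--     for fila in aud:
--         for j in range(ancho):
--             if fila[j] == "X":
--                 cont[j] = cont.get(j, 0) + 1
--     resultado = []
--     for c in range(filas, -1, -1):
--         for j in range(ancho):
--             if cont.get(j, 0) == c:
--                 resultado.append([j, c])
--     return resultado
-- ===== Notes on version B (the rewrite author's own statement) =====
-- stated objective: alternative
-- what changed: B tallies 'X' per column in one row-major pass into a dict and then emits the result by a counting-sort sweep over possible counts from len(aud) down to 0 (index-ascending within each count), replacing A's column-major nested count plus comparison sort with key (-count, index).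
import Mathlib
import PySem

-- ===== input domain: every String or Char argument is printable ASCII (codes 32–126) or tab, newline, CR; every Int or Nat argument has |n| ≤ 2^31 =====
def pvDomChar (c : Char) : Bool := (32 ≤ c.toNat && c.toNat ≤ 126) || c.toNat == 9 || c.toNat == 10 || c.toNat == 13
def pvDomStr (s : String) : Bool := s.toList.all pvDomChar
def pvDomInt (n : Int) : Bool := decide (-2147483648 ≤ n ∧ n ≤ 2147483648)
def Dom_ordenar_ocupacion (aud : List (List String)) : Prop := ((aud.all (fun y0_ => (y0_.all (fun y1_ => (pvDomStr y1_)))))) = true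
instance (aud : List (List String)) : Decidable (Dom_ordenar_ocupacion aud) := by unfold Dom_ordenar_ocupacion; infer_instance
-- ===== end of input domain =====

-- B replaces A's column-major count plus comparison sort by a row-major dict tally
-- and a counting-sort sweep over counts from len(aud) down to 0 (alternative algorithm,
-- return value proved equal on Pre_).

-- ===== PORT A =====
def criterio (item : List Int) : Int × Int :=
  (-(PySem.List.pyGetD item 1 0), PySem.List.pyGetD item 0 0)

def ordenar_ocupacion (aud : List (List String)) : List (List Int) :=
  -- lista = [] ; indice = 0 ; for indice_c in range(len(aud[0])): … (state = (lista, indice))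
  let st := (PySem.List.pyRange 0 (((PySem.List.pyGetD aud 0 []).length : Int)) 1).foldl
    (fun (st : List (List Int) × Int) indice_c =>
      let contador_x : Int := (PySem.List.pyRange 0 ((aud.length : Int)) 1).foldl
        (fun contador_x indice_f =>
          if PySem.List.pyGetD (PySem.List.pyGetD aud indice_f []) indice_c "" == "X"
          then contador_x + 1 else contador_x) 0
      (st.1 ++ [[st.2, contador_x]], st.2 + 1)) ([], 0)
  PySem.List.sorted2 st.1 (fun item => (criterio item).1) (fun item => (criterio item).2)

-- ===== PORT B =====
def ordenar_ocupacion_alt (aud : List (List String)) : List (List Int) :=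
  let ancho : Int := ((PySem.List.pyGetD aud 0 []).length : Int)
  let filas : Int := (aud.length : Int)
  let cont : PySem.Dict Int Int :=
    aud.foldl (fun cont fila =>
      (PySem.List.pyRange 0 ancho 1).foldl (fun cont j =>
        if PySem.List.pyGetD fila j "" == "X"
        then cont.insert j (cont.getD j 0 + 1) else cont) cont) (PySem.Dict.empty)
  (PySem.List.pyRange filas (-1) (-1)).foldl (fun resultado c =>
    (PySem.List.pyRange 0 ancho 1).foldl (fun resultado j =>
      if cont.getD j 0 == c then resultado ++ [[j, c]] else resultado) resultado) []

-- ===== PRECONDITION & SPEC =====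
-- Pre_ excludes exactly the inputs where the Python A raises IndexError: empty aud
-- (aud[0]) and grids with a row shorter than the first row (aud[f][c]); B raises there too.
def Pre_ordenar_ocupacion (aud : List (List String)) : Prop :=
  aud ≠ [] ∧ ∀ fila ∈ aud, (aud.headD []).length ≤ fila.length
instance (aud : List (List String)) : Decidable (Pre_ordenar_ocupacion aud) := by unfold Pre_ordenar_ocupacion; infer_instance

def pvWitness_ordenar_ocupacion : List (List String) := [["X", "a"], ["b", "X"], ["X", "X"]]

def Spec_ordenar_ocupacion (aud : List (List String)) (out : List (List Int)) : Prop := out = ordenar_ocupacion_alt aud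
instance (aud : List (List String)) (out : List (List Int)) : Decidable (Spec_ordenar_ocupacion aud out) := by unfold Spec_ordenar_ocupacion; infer_instance

-- ===== CLAIM (what is proved, stated in full; the proofs are below) =====
def Claim_equal_ordenar_ocupacion : Prop := ∀ (aud : List (List String)), Dom_ordenar_ocupacion aud → Pre_ordenar_ocupacion aud → Spec_ordenar_ocupacion aud (ordenar_ocupacion aud)

-- ===== LEMMAS AND PROOFS =====

-- the number of rows of `aud` whose entry in column j is "X"
def cnt (aud : List (List String)) (j : Int) : Int :=
  (aud.countP (fun fila => PySem.List.pyGetD fila j "" == "X") : Int)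

-- lex key of A's sort (criterio as a single linearly ordered key)
def lexKey (item : List Int) : Lex (Int × Int) := toLex ((criterio item).1, (criterio item).2)

lemma before_eq (x1 y1 x2 y2 : Int) :
    (decide (x1 < x2) || (!decide (x2 < x1) && decide (y1 < y2)))
      = decide (toLex (x1, y1) < toLex (x2, y2)) := by
  by_cases h1 : x1 < x2 <;> by_cases h2 : x2 < x1 <;> by_cases h3 : y1 < y2 <;>
    simp [Prod.Lex.toLex_lt_toLex, h1, h2, h3] <;> omega

lemma sorted2_eq_sorted_lex (xs : List (List Int)) (k1 k2 : List Int → Int) :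
    PySem.List.sorted2 xs k1 k2 = PySem.List.sorted xs (fun x => toLex (k1 x, k2 x)) := by
  show xs.foldl (fun acc x => PySem.List.insertBy _ x acc) []
      = xs.foldl (fun acc x => PySem.List.insertBy _ x acc) []
  congr 1
  funext acc x
  congr 1
  funext a b
  exact before_eq (k1 a) (k2 a) (k1 b) (k2 b)

-- A's outer loop: appending [indice, g indice_c] while indice runs with indice_c
lemma foldA (g : Int → Int) : ∀ (n : Nat) (a : Int) (acc : List (List Int)),
    (PySem.List.pyRange a (a + n) 1).foldl
        (fun (st : List (List Int) × Int) j => (st.1 ++ [[st.2, g j]], st.2 + 1)) (acc, a)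
      = (acc ++ (PySem.List.pyRange a (a + n) 1).map (fun j => [j, g j]), a + n) := by
  intro n
  induction n with
  | zero => intro a acc; simp
  | succ k ih =>
    intro a acc
    rw [PySem.List.pyRange_one_cons (by push_cast; omega : a < a + ((k:Nat)+1:Nat))]
    simp only [List.foldl_cons, List.map_cons]
    have h1 : a + ((k:Nat)+1:Nat) = (a+1) + (k:Nat) := by push_cast; omega
    rw [h1]
    have h2 := ih (a+1) (acc ++ [[a, g a]])
    simp only [List.cons_append, List.append_assoc] at h2 ⊢
    exact h2

-- B's inner loop effect on one dict key
lemma inner_getD (fila : List String) (j0 : Int) : ∀ (js : List Int), js.Nodup → ∀ (d : PySem.Dict Int Int),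
    (js.foldl (fun cont j =>
        if PySem.List.pyGetD fila j "" == "X"
        then cont.insert j (cont.getD j 0 + 1) else cont) d).getD j0 0
      = d.getD j0 0 + (if j0 ∈ js ∧ PySem.List.pyGetD fila j0 "" == "X" then 1 else 0) := by
  intro js
  induction js with
  | nil => intro _ d; simp
  | cons j t ih =>
    intro hnd d
    have hnt := (List.nodup_cons.mp hnd).2
    have hjt := (List.nodup_cons.mp hnd).1
    simp only [List.foldl_cons]
    by_cases hx : PySem.List.pyGetD fila j "" == "X"
    · rw [if_pos hx, ih hnt]
      rw [PySem.Dict.getD_insert]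
      by_cases he : j0 = j
      · subst he
        simp [hjt, hx]
      · simp [he, List.mem_cons]
    · rw [if_neg hx, ih hnt]
      by_cases he : j0 = j
      · subst he
        simp [hjt, hx]
      · simp [he, List.mem_cons]

-- B's tally loop computes cnt on every in-range column
lemma outer_getD (W j0 : Int) (hj0 : 0 ≤ j0) (hjW : j0 < W) :
    ∀ (rows : List (List String)) (d : PySem.Dict Int Int),
    (rows.foldl (fun cont fila =>
        (PySem.List.pyRange 0 W 1).foldl (fun cont j =>
          if PySem.List.pyGetD fila j "" == "X"
          then cont.insert j (cont.getD j 0 + 1) else cont) cont) d).getD j0 0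
      = d.getD j0 0 + cnt rows j0 := by
  intro rows
  induction rows with
  | nil => intro d; simp [cnt]
  | cons fila t ih =>
    intro d
    simp only [List.foldl_cons]
    rw [ih, inner_getD fila j0 _ (PySem.List.nodup_pyRange_one 0 W)]
    have hmem : j0 ∈ PySem.List.pyRange 0 W 1 := (PySem.List.mem_pyRange_one).mpr ⟨hj0, hjW⟩
    by_cases hx : PySem.List.pyGetD fila j0 "" == "X"
    · simp [cnt, hmem, hx]
      omega
    · simp [cnt, hmem, hx]

-- distinct-bucket partition of a list is a permutation of it
lemma partition_perm (f : Int → Int) : ∀ (ks : List Int), ks.Nodup →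
    ∀ (l : List Int), (∀ x ∈ l, f x ∈ ks) →
    (ks.flatMap (fun k => l.filter (fun x => f x == k))).Perm l := by
  intro ks
  induction ks with
  | nil =>
    intro _ l hl
    have h : l = [] := List.eq_nil_iff_forall_not_mem.mpr (fun x hx => by simpa using hl x hx)
    simp [h]
  | cons k t ih =>
    intro hnd l hl
    have hkt := (List.nodup_cons.mp hnd).1
    have hnt := (List.nodup_cons.mp hnd).2
    simp only [List.flatMap_cons]
    set l' := l.filter (fun x => !(f x == k)) with hl'
    have hstep : ∀ k' ∈ t, l.filter (fun x => f x == k') = l'.filter (fun x => f x == k') := by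
      intro k' hk'
      have hne : k' ≠ k := by rintro rfl; exact hkt hk'
      rw [hl', List.filter_filter]
      apply List.filter_congr
      intro x _
      by_cases h : f x == k'
      · have h2 : ¬ (f x == k) = true := by
          simp only [beq_iff_eq] at h ⊢; omega
        simp [h, h2]
      · simp [h]
    have hmap : t.flatMap (fun k' => l.filter (fun x => f x == k'))
        = t.flatMap (fun k' => l'.filter (fun x => f x == k')) :=
      List.flatMap_congr (fun k' hk' => hstep k' hk')
    rw [hmap]
    have hl'mem : ∀ x ∈ l', f x ∈ t := by
      intro x hx
      have h1 := List.mem_filter.mp hx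
      have h2 := hl x h1.1
      rcases List.mem_cons.mp h2 with h3 | h3
      · exfalso
        have h4 : ¬ (f x == k) = true := by simpa using h1.2
        exact h4 (by simp [h3])
      · exact h3
    have p1 : (l.filter (fun x => f x == k) ++ t.flatMap (fun k' => l'.filter (fun x => f x == k'))).Perm
        (l.filter (fun x => f x == k) ++ l') := (ih hnt l' hl'mem).append_left _
    have p2 : (l.filter (fun x => f x == k) ++ l').Perm l := by
      rw [hl']; exact List.filter_append_perm _ l
    exact p1.trans p2

-- ===== VERDICT (by name: the statement is the Claim_ definition above) =====
theorem ordenar_ocupacion_spec : Claim_equal_ordenar_ocupacion := by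
  intro aud _ _
  unfold Spec_ordenar_ocupacion
  have hAval : ordenar_ocupacion aud
      = PySem.List.sorted2
          ((PySem.List.pyRange 0 (((PySem.List.pyGetD aud 0 []).length : Int)) 1).map
            (fun j => [j, cnt aud j]))
          (fun item => (criterio item).1) (fun item => (criterio item).2) := by
    simp only [ordenar_ocupacion]
    have hA := foldA (fun j => List.foldl
        (fun contador_x indice_f =>
          if (PySem.List.pyGetD (PySem.List.pyGetD aud indice_f []) j "" == "X") = true then
            contador_x + 1 else contador_x)
        0 (PySem.List.pyRange 0 (aud.length : Int)))
      ((PySem.List.pyGetD aud 0 []).length) 0 []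
    simp only [zero_add, List.nil_append] at hA
    rw [hA]
    have hF : ∀ j : Int, List.foldl
        (fun contador_x indice_f =>
          if (PySem.List.pyGetD (PySem.List.pyGetD aud indice_f []) j "" == "X") = true then
            contador_x + 1 else contador_x)
        0 (PySem.List.pyRange 0 (aud.length : Int)) = cnt aud j := by
      intro j
      have h1 := PySem.List.foldl_pyRange_zero_pyGetD' aud []
        (fun (acc : Int) fila => if (PySem.List.pyGetD fila j "" == "X") = true then acc + 1 else acc) (0 : Int)
      simp only [] at h1
      refine h1.trans ?_
      rw [PySem.List.foldl_count_if]
      simp [cnt]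
    exact congrArg _ (List.map_congr_left (fun j _ => by rw [hF j]))
  have hcont : ∀ j : Int, 0 ≤ j → j < ((PySem.List.pyGetD aud 0 []).length : Int) →
      (aud.foldl (fun cont fila =>
          (PySem.List.pyRange 0 ((PySem.List.pyGetD aud 0 []).length : Int) 1).foldl (fun cont j =>
            if PySem.List.pyGetD fila j "" == "X"
            then cont.insert j (cont.getD j 0 + 1) else cont) cont) PySem.Dict.empty).getD j 0
        = cnt aud j := by
    intro j h1 h2
    rw [outer_getD _ j h1 h2 aud PySem.Dict.empty]
    simp [PySem.Dict.empty, PySem.Dict.getD, PySem.Dict.get?]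
  have hBval : ordenar_ocupacion_alt aud
      = (PySem.List.pyRange (aud.length : Int) (-1) (-1)).flatMap
          (fun c => ((PySem.List.pyRange 0 ((PySem.List.pyGetD aud 0 []).length : Int) 1).filter
              (fun j => cnt aud j == c)).map (fun j => [j, cnt aud j])) := by
    simp only [ordenar_ocupacion_alt]
    simp only [PySem.List.foldl_append_if]
    simp only [PySem.List.foldl_append_eq_flatMap, List.nil_append]
    apply List.flatMap_congr
    intro c _
    have hfil := List.filter_congr (l := PySem.List.pyRange 0 ((PySem.List.pyGetD aud 0 []).length : Int) 1)
      (fun j hj => by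
        rw [hcont j ((PySem.List.mem_pyRange_one).mp hj).1 ((PySem.List.mem_pyRange_one).mp hj).2] :
        ∀ j ∈ PySem.List.pyRange 0 ((PySem.List.pyGetD aud 0 []).length : Int) 1,
          ((aud.foldl (fun cont fila =>
              (PySem.List.pyRange 0 ((PySem.List.pyGetD aud 0 []).length : Int) 1).foldl (fun cont j =>
                if PySem.List.pyGetD fila j "" == "X"
                then cont.insert j (cont.getD j 0 + 1) else cont) cont) PySem.Dict.empty).getD j 0 == c)
            = (cnt aud j == c))
    rw [hfil]
    apply List.map_congr_left
    intro j hj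
    have hc : cnt aud j = c := by
      have := (List.mem_filter.mp hj).2
      simpa using this
    rw [hc]
  rw [hAval, hBval, sorted2_eq_sorted_lex]
  have hnodup : (PySem.List.pyRange (aud.length : Int) (-1) (-1)).Nodup := by
    rw [PySem.List.pyRange_neg_one_eq_reverse]
    exact List.nodup_reverse.mpr (PySem.List.nodup_pyRange_one _ _)
  have hmem : ∀ x ∈ PySem.List.pyRange 0 ((PySem.List.pyGetD aud 0 []).length : Int) 1,
      cnt aud x ∈ PySem.List.pyRange (aud.length : Int) (-1) (-1) := by
    intro x _
    refine (PySem.List.mem_pyRange_neg_one).mpr ⟨?_, ?_⟩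
    · have : 0 ≤ cnt aud x := Int.natCast_nonneg _
      omega
    · have := List.countP_le_length (l := aud) (p := fun fila => PySem.List.pyGetD fila x "" == "X")
      simp only [cnt]
      omega
  have hperm0 := partition_perm (cnt aud) _ hnodup _ hmem
  refine PySem.List.sorted_eq_of_perm_of_pairwise_lt _ _ _ ?_ ?_
  · -- permutation
    have hmf : (PySem.List.pyRange (aud.length : Int) (-1) (-1)).flatMap
        (fun c => ((PySem.List.pyRange 0 ((PySem.List.pyGetD aud 0 []).length : Int) 1).filter
            (fun j => cnt aud j == c)).map (fun j => [j, cnt aud j]))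
        = ((PySem.List.pyRange (aud.length : Int) (-1) (-1)).flatMap
            (fun c => (PySem.List.pyRange 0 ((PySem.List.pyGetD aud 0 []).length : Int) 1).filter
              (fun j => cnt aud j == c))).map (fun j => ([j, cnt aud j] : List Int)) := by
      rw [List.map_flatMap]
    rw [hmf]
    exact hperm0.map _
  · -- pairwise strictly increasing keys
    rw [List.flatMap_def]
    refine List.pairwise_flatten.mpr ⟨?_, ?_⟩
    · intro lc hlc
      obtain ⟨c, hc, rfl⟩ := List.mem_map.mp hlc
      refine List.pairwise_map.mpr ?_
      have hp : ((PySem.List.pyRange 0 ((PySem.List.pyGetD aud 0 []).length : Int) 1).filter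
          (fun j => cnt aud j == c)).Pairwise (· < ·) :=
        (PySem.List.pairwise_lt_pyRange_one 0 _).filter _
      refine hp.imp_of_mem ?_
      intro a b ha hb hab
      have hca : cnt aud a = c := by simpa using (List.mem_filter.mp ha).2
      have hcb : cnt aud b = c := by simpa using (List.mem_filter.mp hb).2
      refine Prod.Lex.toLex_lt_toLex.mpr (Or.inr ⟨?_, ?_⟩)
      · show -(cnt aud a) = -(cnt aud b); rw [hca, hcb]
      · exact hab
    · refine List.pairwise_map.mpr ?_
      have hks : (PySem.List.pyRange (aud.length : Int) (-1) (-1)).Pairwise (fun c1 c2 => c2 < c1) := by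
        rw [PySem.List.pyRange_neg_one_eq_reverse]
        exact List.pairwise_reverse.mpr (PySem.List.pairwise_lt_pyRange_one _ _)
      refine hks.imp ?_
      intro c1 c2 h12 x hx y hy
      obtain ⟨j1, hj1, rfl⟩ := List.mem_map.mp hx
      obtain ⟨j2, hj2, rfl⟩ := List.mem_map.mp hy
      have hc1 : cnt aud j1 = c1 := by simpa using (List.mem_filter.mp hj1).2
      have hc2 : cnt aud j2 = c2 := by simpa using (List.mem_filter.mp hj2).2
      refine Prod.Lex.toLex_lt_toLex.mpr (Or.inl ?_)
      show -(cnt aud j1) < -(cnt aud j2)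
      omega
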